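-- pv_equiv track=rewrite | github.com/TokTok/ci-tools | tools/lib/github.py | patch_markdown_section
-- ===== SOURCE A (Python) =====
-- def patch_markdown_section(body: str, header: str, content: str) -> str:
--     """Patch a specific section in a Markdown body.
--
--     The section is identified by its header (e.g. "### Release progress").
--     If the section exists, its content is replaced.
--     If it doesn't exist, it is prepended to the body.
--     """
--     lines = body.splitlines()
--     start_index = -1
--     end_index = -1
--
--     header_level = len(header) - len(header.lstrip("#"))
--
--     for i, line in enumerate(lines):
--         if line.startswith(header):
--             start_index = i
--             # Find the next header of the same or higher level
--             for j in range(i + 1, len(lines)):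
--                 if lines[j].startswith("#"):
--                     next_header_level = len(lines[j]) - len(lines[j].lstrip("#"))
--                     if next_header_level <= header_level:
--                         end_index = j
--                         break
--             if end_index == -1:
--                 end_index = len(lines)
--             break
--
--     # Normalize content: ensure it ends with a newline and is stripped
--     content = content.strip()
--     new_section = [header, content, ""]
--
--     if start_index != -1:
--         # Replace existing section
--         return (
--             "\n".join(lines[:start_index] + new_section + lines[end_index:]).strip()
--             + "\n"
--         )
--     else:
--         # Prepend new section
--         return "\n".join(new_section + lines).strip() + "\n"
-- ===== SOURCE B (Python) =====
-- def patch_markdown_section(body: str, header: str, content: str) -> str: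
--     """Single linear pass: copy lines, replace the first section whose header
--     line starts with `header`, skipping its old content until the next header
--     of the same or higher level; prepend the section if never found."""
--     header_level = 0
--     while header_level < len(header) and header[header_level] == '#':
--         header_level += 1
--     new_section = [header, content.strip(), '']
--     out = []
--     found = False
--     skipping = False
--     for line in body.splitlines():
--         if skipping:
--             nl = 0
--             while nl < len(line) and line[nl] == '#':
--                 nl += 1
--             if line.startswith('#') and nl <= header_level:
--                 skipping = False
--                 out.append(line)
--         elif not found and line.startswith(header):
--             found = True
--             skipping = True
--             out.extend(new_section)
--         else:
--             out.append(line)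
--     if not found:
--         out = new_section + out
--     return '\n'.join(out).strip() + '\n'
-- ===== Notes on version B (the rewrite author's own statement) =====
-- stated objective: alternative
-- what changed: A locates the section by a find-start-index/find-end-index scan and splices slices (lines[:start] + new_section + lines[end:]); B is a single linear pass over the lines with found/skipping mode flags that copies, emits the new section at the first match, and drops lines until the next boundary header.
import Mathlib
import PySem

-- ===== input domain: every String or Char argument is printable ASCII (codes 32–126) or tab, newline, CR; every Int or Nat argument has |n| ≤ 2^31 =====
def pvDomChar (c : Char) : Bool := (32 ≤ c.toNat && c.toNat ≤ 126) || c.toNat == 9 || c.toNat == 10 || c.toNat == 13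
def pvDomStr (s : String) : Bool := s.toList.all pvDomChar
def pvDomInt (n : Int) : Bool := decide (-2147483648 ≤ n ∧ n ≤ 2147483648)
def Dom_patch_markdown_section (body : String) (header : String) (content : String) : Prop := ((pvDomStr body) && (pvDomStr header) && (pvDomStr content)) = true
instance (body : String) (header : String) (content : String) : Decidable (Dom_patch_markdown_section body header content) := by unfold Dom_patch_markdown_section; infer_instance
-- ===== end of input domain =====

-- B replaces A's find-start-index / find-end-index / slice-and-splice decomposition by a single
-- linear pass over the lines with a found/skipping mode flag (alternative decomposition, same cost).

-- ===== PORT A =====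
-- len(s) - len(s.lstrip("#")): lstrip with a chars argument, ported by hand as dropWhile '#' (exact)
def pvLevel (s : String) : Nat := s.toList.length - (s.toList.dropWhile (fun c => c == '#')).length

def patch_markdown_section (body : String) (header : String) (content : String) : String :=
  let lines := PySem.Str.splitlines body
  let headerLevel := pvLevel header
  let newSection := [header, PySem.Str.strip content, ""]
  match (PySem.List.enumerate lines).find? (fun p => PySem.Str.startswith p.2 header) with
  | some (i, _) =>
      let endIndex : Int :=
        match (PySem.List.pyRange (i + 1) lines.length 1).find?
            (fun j => PySem.Str.startswith (PySem.List.pyGetD lines j "") "#"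
                      && decide (pvLevel (PySem.List.pyGetD lines j "") ≤ headerLevel)) with
        | some j => j
        | none => lines.length
      PySem.Str.strip (PySem.Str.join "\n"
        (PySem.List.slice lines none (some i) ++ newSection ++ PySem.List.slice lines (some endIndex) none)) ++ "\n"
  | none =>
      PySem.Str.strip (PySem.Str.join "\n" (newSection ++ lines)) ++ "\n"

-- ===== PORT B =====
-- while-loop counting leading '#' characters
def pvCountLead : List Char → Nat
  | [] => 0
  | c :: cs => if c == '#' then pvCountLead cs + 1 else 0

-- the single pass: state (found, skipping); returns (output lines, found)
def pvGoB (header : String) (hl : Nat) (newSection : List String) :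
    List String → Bool → Bool → List String × Bool
  | [], found, _ => ([], found)
  | l :: ls, found, skipping =>
    if skipping then
      if PySem.Str.startswith l "#" && decide (pvCountLead l.toList ≤ hl) then
        let r := pvGoB header hl newSection ls found false
        (l :: r.1, r.2)
      else
        pvGoB header hl newSection ls found true
    else if !found && PySem.Str.startswith l header then
      let r := pvGoB header hl newSection ls true true
      (newSection ++ r.1, r.2)
    else
      let r := pvGoB header hl newSection ls found false
      (l :: r.1, r.2)

def patch_markdown_section_alt (body : String) (header : String) (content : String) : String :=
  let hl := pvCountLead header.toList
  let newSection := [header, PySem.Str.strip content, ""]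
  let r := pvGoB header hl newSection (PySem.Str.splitlines body) false false
  let out := if r.2 then r.1 else newSection ++ r.1
  PySem.Str.strip (PySem.Str.join "\n" out) ++ "\n"

-- ===== PRECONDITION & SPEC =====
def Spec_patch_markdown_section (body : String) (header : String) (content : String) (out : String) : Prop := out = patch_markdown_section_alt body header content
instance (body : String) (header : String) (content : String) (out : String) : Decidable (Spec_patch_markdown_section body header content out) := by unfold Spec_patch_markdown_section; infer_instance

-- ===== CLAIM (what is proved, stated in full; the proofs are below) =====
def Claim_equal_patch_markdown_section : Prop := ∀ (body : String) (header : String) (content : String), Dom_patch_markdown_section body header content → Spec_patch_markdown_section body header content (patch_markdown_section body header content)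

-- ===== LEMMAS AND PROOFS =====

theorem pvCountLead_eq (cs : List Char) :
    pvCountLead cs = cs.length - (cs.dropWhile (fun c => c == '#')).length := by
  induction cs with
  | nil => rfl
  | cons c cs ih =>
    simp only [pvCountLead, List.dropWhile_cons]
    by_cases h : (c == '#') = true
    · simp only [h, if_true, ih, List.length_cons]
      have hle := List.length_dropWhile_le (fun c => c == '#') cs
      omega
    · simp only [h, if_false, Bool.false_eq_true, List.length_cons]
      omega

theorem pvLevel_eq_countLead (s : String) : pvLevel s = pvCountLead s.toList := by
  rw [pvCountLead_eq]; rfl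

theorem pvDecomp (p : String → Bool) (ls : List String) :
    (∀ l ∈ ls, p l = false) ∨
      ∃ pre x rest, ls = pre ++ x :: rest ∧ (∀ l ∈ pre, p l = false) ∧ p x = true := by
  induction ls with
  | nil => exact Or.inl (by simp)
  | cons l ls ih =>
    by_cases h : p l = true
    · exact Or.inr ⟨[], l, ls, by simp, by simp, h⟩
    · have h' : p l = false := by simpa using h
      rcases ih with h1 | ⟨pre, x, rest, h2, h3, h4⟩
      · refine Or.inl ?_
        intro m hm
        rcases List.mem_cons.mp hm with rfl | hm'
        · exact h'
        · exact h1 m hm'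
      · refine Or.inr ⟨l :: pre, x, rest, by simp [h2], ?_, h4⟩
        intro m hm
        rcases List.mem_cons.mp hm with rfl | hm'
        · exact h'
        · exact h3 m hm'

theorem pvEnumFindNone (p : String → Bool) (ls : List String) (s : Int)
    (h : ∀ l ∈ ls, p l = false) :
    (PySem.List.enumerate ls s).find? (fun q => p q.2) = none := by
  induction ls generalizing s with
  | nil => simp [PySem.List.enumerate_nil]
  | cons l ls ih =>
    rw [PySem.List.enumerate_cons]
    rw [List.find?_cons_of_neg (by simpa using h l (by simp))]
    exact ih (s + 1) (fun m hm => h m (by simp [hm]))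

theorem pvEnumFindSome (p : String → Bool) (pre : List String) (x : String) (rest : List String)
    (s : Int) (hpre : ∀ l ∈ pre, p l = false) (hx : p x = true) :
    (PySem.List.enumerate (pre ++ x :: rest) s).find? (fun q => p q.2)
      = some (s + pre.length, x) := by
  induction pre generalizing s with
  | nil =>
    rw [List.nil_append, PySem.List.enumerate_cons]
    rw [List.find?_cons_of_pos (by simpa using hx)]
    simp
  | cons l pre ih =>
    rw [List.cons_append, PySem.List.enumerate_cons]
    rw [List.find?_cons_of_neg (by simpa using hpre l (by simp))]
    rw [ih (s + 1) (fun m hm => hpre m (by simp [hm]))]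
    congr 1
    simp
    omega

theorem pvDropGet (l : List String) (a : Nat) (m : String) (r : List String)
    (h : l.drop a = m :: r) : l[a]? = some m := by
  have : (l.drop a)[0]? = some m := by rw [h]; rfl
  rwa [List.getElem?_drop, Nat.add_zero] at this

theorem pvLtLen (l : List String) (a : Nat) (m : String) (r : List String)
    (h : l.drop a = m :: r) : a < l.length := by
  by_contra hc
  rw [List.drop_eq_nil_of_le (by omega)] at h
  simp at h

theorem pvDropSucc (l : List String) (a : Nat) (m : String) (r : List String)
    (h : l.drop a = m :: r) : l.drop (a + 1) = r := by
  rw [← List.drop_drop, h]; rfl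

theorem pvRangeFindNone (q : String → Bool) (lines rest : List String) (a : Nat)
    (hd : lines.drop a = rest) (h : ∀ l ∈ rest, q l = false) :
    (PySem.List.pyRange (a : Int) (lines.length : Int) 1).find?
      (fun j => q (PySem.List.pyGetD lines j "")) = none := by
  induction rest generalizing a with
  | nil =>
    have hle : lines.length ≤ a := by
      by_contra hc
      have := List.drop_eq_nil_iff.mp hd
      omega
    rw [PySem.List.pyRange_one_eq_nil (by exact_mod_cast hle)]
    rfl
  | cons m r ih =>
    have hlt : a < lines.length := pvLtLen lines a m r hd
    rw [PySem.List.pyRange_one_cons (by exact_mod_cast hlt)]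
    rw [List.find?_cons_of_neg ?_]
    · have : ((a : Int) + 1) = ((a + 1 : Nat) : Int) := by push_cast; ring
      rw [this]
      exact ih (a + 1) (pvDropSucc lines a m r hd) (fun l hl => h l (by simp [hl]))
    · have hget : PySem.List.pyGetD lines (a : Int) "" = m := by
        rw [PySem.List.pyGetD_natCast, List.getD_eq_getElem?_getD, pvDropGet lines a m r hd]
        rfl
      simp [hget, h m (by simp)]

theorem pvRangeFindSome (q : String → Bool) (lines mid : List String) (b : String)
    (tail : List String) (a : Nat) (hd : lines.drop a = mid ++ b :: tail)
    (hm : ∀ l ∈ mid, q l = false) (hb : q b = true) :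
    (PySem.List.pyRange (a : Int) (lines.length : Int) 1).find?
      (fun j => q (PySem.List.pyGetD lines j "")) = some ((a + mid.length : Nat) : Int) := by
  induction mid generalizing a with
  | nil =>
    rw [List.nil_append] at hd
    have hlt : a < lines.length := pvLtLen lines a b tail hd
    rw [PySem.List.pyRange_one_cons (by exact_mod_cast hlt)]
    have hget : PySem.List.pyGetD lines (a : Int) "" = b := by
      rw [PySem.List.pyGetD_natCast, List.getD_eq_getElem?_getD, pvDropGet lines a b tail hd]
      rfl
    rw [List.find?_cons_of_pos (by simp [hget, hb])]
    simp
  | cons m mid' ih =>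
    rw [List.cons_append] at hd
    have hlt : a < lines.length := pvLtLen lines a m _ hd
    rw [PySem.List.pyRange_one_cons (by exact_mod_cast hlt)]
    rw [List.find?_cons_of_neg ?_]
    · have hcast : ((a : Int) + 1) = ((a + 1 : Nat) : Int) := by push_cast; ring
      rw [hcast, ih (a + 1) (pvDropSucc lines a m _ hd) (fun l hl => hm l (by simp [hl]))]
      congr 1
      push_cast [List.length_cons]
      ring
    · have hget : PySem.List.pyGetD lines (a : Int) "" = m := by
        rw [PySem.List.pyGetD_natCast, List.getD_eq_getElem?_getD, pvDropGet lines a m _ hd]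
        rfl
      simp [hget, hm m (by simp)]

theorem pvGoB_found (header : String) (hl : Nat) (ns ls : List String) :
    pvGoB header hl ns ls true false = (ls, true) := by
  induction ls with
  | nil => rfl
  | cons l ls ih => simp [pvGoB, ih]

theorem pvGoB_nomatch (header : String) (hl : Nat) (ns ls : List String)
    (h : ∀ l ∈ ls, PySem.Str.startswith l header = false) :
    pvGoB header hl ns ls false false = (ls, false) := by
  induction ls with
  | nil => rfl
  | cons l ls ih =>
    have h' : PySem.Chars.startswith l.toList header.toList = false := by
      simpa using h l (by simp)
    simp [pvGoB, h', ih (fun m hm => h m (by simp [hm]))]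

theorem pvGoB_skip_none (header : String) (hl : Nat) (ns ls : List String) (f : Bool)
    (h : ∀ l ∈ ls, (PySem.Str.startswith l "#" && decide (pvCountLead l.toList ≤ hl)) = false) :
    pvGoB header hl ns ls f true = ([], f) := by
  induction ls with
  | nil => rfl
  | cons l ls ih =>
    have h' := h l (by simp)
    rw [show pvGoB header hl ns (l :: ls) f true =
      (if PySem.Str.startswith l "#" && decide (pvCountLead l.toList ≤ hl) then
        (l :: (pvGoB header hl ns ls f false).1, (pvGoB header hl ns ls f false).2)
      else pvGoB header hl ns ls f true) from rfl]
    rw [h']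
    simp only [Bool.false_eq_true, if_false]
    exact ih (fun m hm => h m (by simp [hm]))

theorem pvGoB_skip_some (header : String) (hl : Nat) (ns mid : List String) (b : String)
    (tail : List String)
    (hm : ∀ l ∈ mid, (PySem.Str.startswith l "#" && decide (pvCountLead l.toList ≤ hl)) = false)
    (hb : (PySem.Str.startswith b "#" && decide (pvCountLead b.toList ≤ hl)) = true) :
    pvGoB header hl ns (mid ++ b :: tail) true true = (b :: tail, true) := by
  induction mid with
  | nil =>
    rw [List.nil_append]
    rw [show pvGoB header hl ns (b :: tail) true true =
      (if PySem.Str.startswith b "#" && decide (pvCountLead b.toList ≤ hl) then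
        (b :: (pvGoB header hl ns tail true false).1, (pvGoB header hl ns tail true false).2)
      else pvGoB header hl ns tail true true) from rfl]
    rw [hb]
    simp [pvGoB_found]
  | cons m mid' ih =>
    have h' := hm m (by simp)
    rw [List.cons_append]
    rw [show pvGoB header hl ns (m :: (mid' ++ b :: tail)) true true =
      (if PySem.Str.startswith m "#" && decide (pvCountLead m.toList ≤ hl) then
        (m :: (pvGoB header hl ns (mid' ++ b :: tail) true false).1,
          (pvGoB header hl ns (mid' ++ b :: tail) true false).2)
      else pvGoB header hl ns (mid' ++ b :: tail) true true) from rfl]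
    rw [h']
    simp only [Bool.false_eq_true, if_false]
    exact ih (fun l hl' => hm l (by simp [hl']))

theorem pvGoB_prefix (header : String) (hl : Nat) (ns pre xs : List String)
    (h : ∀ l ∈ pre, PySem.Str.startswith l header = false) :
    pvGoB header hl ns (pre ++ xs) false false
      = (pre ++ (pvGoB header hl ns xs false false).1, (pvGoB header hl ns xs false false).2) := by
  induction pre with
  | nil => simp
  | cons l pre ih =>
    have h' : PySem.Chars.startswith l.toList header.toList = false := by
      simpa using h l (by simp)
    simp [pvGoB, h', ih (fun m hm => h m (by simp [hm]))]

theorem pvGoB_match (header : String) (hl : Nat) (ns : List String) (x : String)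
    (rest : List String) (hx : PySem.Str.startswith x header = true) :
    pvGoB header hl ns (x :: rest) false false
      = (ns ++ (pvGoB header hl ns rest true true).1, (pvGoB header hl ns rest true true).2) := by
  have hx' : PySem.Chars.startswith x.toList header.toList = true := by simpa using hx
  simp [pvGoB, hx']

-- ===== VERDICT (by name: the statement is the Claim_ definition above) =====

theorem patch_markdown_section_spec : Claim_equal_patch_markdown_section := by
  intro body header content _
  unfold Spec_patch_markdown_section patch_markdown_section patch_markdown_section_alt
  simp only [pvLevel_eq_countLead]
  rcases pvDecomp (fun l => PySem.Str.startswith l header) (PySem.Str.splitlines body)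
    with hno | ⟨pre, x, rest, hsplit, hpre, hx⟩
  · rw [pvEnumFindNone _ _ _ hno, pvGoB_nomatch header _ _ _ hno]
    simp
  · rw [hsplit, pvEnumFindSome _ pre x rest 0 hpre hx]
    rw [pvGoB_prefix header _ _ pre (x :: rest) hpre, pvGoB_match header _ _ x rest hx]
    simp only [zero_add]
    have hc : ((pre.length : Int) + 1) = ((pre.length + 1 : Nat) : Int) := by push_cast; ring
    rw [hc]
    rcases pvDecomp (fun l => PySem.Str.startswith l "#" &&
        decide (pvCountLead l.toList ≤ pvCountLead header.toList)) rest
      with hno2 | ⟨mid, b, tail, hr, hmid, hb⟩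
    · have hdrop : (pre ++ x :: rest).drop (pre.length + 1) = rest :=
        pvDropSucc _ pre.length x rest (by simp)
      rw [pvRangeFindNone _ _ rest (pre.length + 1) hdrop hno2]
      rw [pvGoB_skip_none header _ _ rest true hno2]
      rw [PySem.List.slice_to_natCast, List.take_left]
      rw [show ((pre ++ x :: rest).length : Int) = (((pre ++ x :: rest).length : Nat) : Int) from rfl,
        PySem.List.slice_from_natCast, List.drop_length]
      simp
    · subst hr
      have hdrop : (pre ++ x :: (mid ++ b :: tail)).drop (pre.length + 1) = mid ++ b :: tail :=
        pvDropSucc _ pre.length x _ (by simp)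
      rw [pvRangeFindSome _ _ mid b tail (pre.length + 1) hdrop hmid hb]
      rw [pvGoB_skip_some header _ _ mid b tail hmid hb]
      rw [PySem.List.slice_to_natCast, List.take_left, PySem.List.slice_from_natCast]
      have h1 : (pre ++ x :: (mid ++ b :: tail)).drop (pre.length + 1 + mid.length) = b :: tail := by
        have h2 : pre ++ x :: (mid ++ b :: tail) = (pre ++ x :: mid) ++ b :: tail := by simp
        have hlen : pre.length + 1 + mid.length = (pre ++ x :: mid).length := by
          simp [List.length_append]; omega
        rw [h2, hlen, List.drop_left]
      rw [h1]
      simp
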